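-- pv_equiv track=rewrite | github.com/gmanuel89/Python-packages | common/generate_string_with_concatenated_key_values.py | generate_string_with_concatenated_key_values
-- ===== SOURCE A (Python) =====
-- def generate_string_with_concatenated_key_values(key_column: list[str], values_column: list[str], string_separator=',', selected_key_values=[]) -> dict:
--     # Initialise output
--     output_value_list = {}
--     # Get the unique values
--     unique_key_values = list(set(key_column))
--     # For each key value...
--     for key_value in unique_key_values:
--         if key_value in selected_key_values:
--             key_value_list = []
--             # Scroll the rows and retrieve the values
--             for r in range(len(values_column)):
--                 if key_column[r] == key_value:
--                     key_value_list.append(str(values_column[r]))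
--             # Generate the concatenated string
--             concatenated_value_string = string_separator.join(key_value_list)
--             # Store the value in the output
--             output_value_list[key_value] = concatenated_value_string
--     # return
--     return output_value_list
-- ===== SOURCE B (Python) =====
-- def generate_string_with_concatenated_key_values(key_column: list[str], values_column: list[str], string_separator=',', selected_key_values=[]) -> dict:
--     # Single pass: register each selected key at its first occurrence, then
--     # group values by key in one sweep over the paired columns.
--     selected = set(selected_key_values)
--     groups = {}
--     for k in key_column:
--         if k in selected and k not in groups:
--             groups[k] = []
--     for k, v in zip(key_column, values_column):
--         if k in groups:
--             groups[k].append(str(v))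
--     return {k: string_separator.join(vs) for k, vs in groups.items()}
-- ===== Notes on version B (the rewrite author's own statement) =====
-- stated objective: alternative
-- what changed: Replaced A's loop over the unique keys with a full rescan of the columns per key by a single-pass grouping: register selected keys once, sweep zip(key_column, values_column) appending into a dict of lists, then join each group.
import Mathlib
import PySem

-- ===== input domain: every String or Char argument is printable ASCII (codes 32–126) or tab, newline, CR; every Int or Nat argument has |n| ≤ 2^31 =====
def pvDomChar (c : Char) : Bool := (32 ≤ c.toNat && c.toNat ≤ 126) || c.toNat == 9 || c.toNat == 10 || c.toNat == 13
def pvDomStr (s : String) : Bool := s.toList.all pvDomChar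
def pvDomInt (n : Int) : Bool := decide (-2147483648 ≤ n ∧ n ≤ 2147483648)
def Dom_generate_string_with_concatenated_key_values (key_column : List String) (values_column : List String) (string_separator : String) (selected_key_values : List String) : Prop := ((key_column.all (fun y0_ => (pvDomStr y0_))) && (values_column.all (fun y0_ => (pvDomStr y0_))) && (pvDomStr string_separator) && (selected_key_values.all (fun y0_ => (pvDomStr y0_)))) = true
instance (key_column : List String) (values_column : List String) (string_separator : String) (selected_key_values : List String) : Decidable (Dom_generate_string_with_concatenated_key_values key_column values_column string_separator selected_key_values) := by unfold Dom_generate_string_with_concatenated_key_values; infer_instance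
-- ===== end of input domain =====

-- B replaces A's per-unique-key rescans of the columns by a single-pass dict-of-lists grouping (a different algorithm; equal output proved on Pre_).


-- ===== PORT A =====
-- inner loop: 'for r in range(len(values_column)): if key_column[r] == key_value: key_value_list.append(str(values_column[r]))'
-- (key_column[r]/values_column[r] via pyGet?; Python raises where pyGet? is none — excluded by Pre_)
def pvInnerA (key_column : List String) (values_column : List String) (key_value : String) : List String :=
  (PySem.List.pyRange 0 (values_column.length : Int) 1).foldl
    (fun acc r =>
      if (PySem.List.pyGet? key_column r).getD "" == key_value then
        acc ++ [(PySem.List.pyGet? values_column r).getD ""]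
      else acc) []

def generate_string_with_concatenated_key_values (key_column : List String) (values_column : List String) (string_separator : String) (selected_key_values : List String) : List (String × String) :=
  -- unique_key_values = list(set(key_column)); for each, if selected, store the joined inner list
  ((PySem.Set.ofList key_column).foldl
    (fun output_value_list key_value =>
      if selected_key_values.contains key_value then
        output_value_list.insert key_value
          (PySem.Str.join string_separator (pvInnerA key_column values_column key_value))
      else output_value_list)
    PySem.Dict.empty).items

-- ===== PORT B =====
-- first loop of Source B: register each selected key at its first occurrence
def pvRegisterB (selected : PySem.Set String) (key_column : List String) : PySem.Dict String (List String) :=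
  key_column.foldl
    (fun groups k => if selected.contains k && !(groups.contains k) then groups.insert k [] else groups)
    PySem.Dict.empty

-- second loop of Source B: append each zipped value to its key's group
def pvFillB (groups : PySem.Dict String (List String)) (pairs : List (String × String)) : PySem.Dict String (List String) :=
  pairs.foldl
    (fun groups p => if groups.contains p.1 then groups.modify p.1 [] (· ++ [p.2]) else groups)
    groups

def generate_string_with_concatenated_key_values_alt (key_column : List String) (values_column : List String) (string_separator : String) (selected_key_values : List String) : List (String × String) :=
  ((pvFillB (pvRegisterB (PySem.Set.ofList selected_key_values) key_column)
      (key_column.zip values_column)).items).map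
    (fun p => (p.1, PySem.Str.join string_separator p.2))

-- ===== PRECONDITION & SPEC =====
-- A raises IndexError (key_column[r]) exactly when values_column is longer than key_column AND some
-- selected key occurs in key_column (only then is the inner row loop reached); Pre_ excludes exactly that.
def Pre_generate_string_with_concatenated_key_values (key_column : List String) (values_column : List String) (string_separator : String) (selected_key_values : List String) : Prop :=
  values_column.length ≤ key_column.length ∨ ∀ k ∈ key_column, k ∉ selected_key_values
instance (key_column : List String) (values_column : List String) (string_separator : String) (selected_key_values : List String) : Decidable (Pre_generate_string_with_concatenated_key_values key_column values_column string_separator selected_key_values) := by unfold Pre_generate_string_with_concatenated_key_values; infer_instance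

def pvWitness_generate_string_with_concatenated_key_values : List String × List String × String × List String :=
  (["a", "b", "a"], ["1", "2", "3"], ",", ["a"])

def Spec_generate_string_with_concatenated_key_values (key_column : List String) (values_column : List String) (string_separator : String) (selected_key_values : List String) (out : List (String × String)) : Prop := out = generate_string_with_concatenated_key_values_alt key_column values_column string_separator selected_key_values
instance (key_column : List String) (values_column : List String) (string_separator : String) (selected_key_values : List String) (out : List (String × String)) : Decidable (Spec_generate_string_with_concatenated_key_values key_column values_column string_separator selected_key_values out) := by unfold Spec_generate_string_with_concatenated_key_values; infer_instance

-- ===== CLAIM (what is proved, stated in full; the proofs are below) =====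
def Claim_equal_generate_string_with_concatenated_key_values : Prop := ∀ (key_column : List String) (values_column : List String) (string_separator : String) (selected_key_values : List String), Dom_generate_string_with_concatenated_key_values key_column values_column string_separator selected_key_values → Pre_generate_string_with_concatenated_key_values key_column values_column string_separator selected_key_values → Spec_generate_string_with_concatenated_key_values key_column values_column string_separator selected_key_values (generate_string_with_concatenated_key_values key_column values_column string_separator selected_key_values)

-- ===== LEMMAS AND PROOFS =====
-- proof-only abbreviations
def pvKeysF (kc sel : List String) : List String :=
  (PySem.Set.ofList kc).filter (fun k => sel.contains k)

def pvGroup (kc vc : List String) (kv : String) : List String :=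
  ((kc.zip vc).filter (fun p => p.1 == kv)).map Prod.snd

-- ===== A side =====
lemma pvA_eq (kc vc : List String) (sep : String) (sel : List String) :
    generate_string_with_concatenated_key_values kc vc sep sel
    = (pvKeysF kc sel).map (fun kv => (kv, PySem.Str.join sep (pvInnerA kc vc kv))) := by
  unfold generate_string_with_concatenated_key_values
  have hF : (PySem.Set.ofList kc).foldl
        (fun (d : PySem.Dict String String) kv =>
          if sel.contains kv then d.insert kv (PySem.Str.join sep (pvInnerA kc vc kv)) else d)
        PySem.Dict.empty
      = ((PySem.Set.ofList kc).filter (fun kv => sel.contains kv)).foldl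
        (fun (d : PySem.Dict String String) kv =>
          d.insert kv (PySem.Str.join sep (pvInnerA kc vc kv))) PySem.Dict.empty :=
    PySem.List.foldl_if_eq_foldl_filter (fun kv => sel.contains kv)
      (fun (d : PySem.Dict String String) kv =>
        d.insert kv (PySem.Str.join sep (pvInnerA kc vc kv))) _ _
  rw [hF]
  have hI : (((PySem.Set.ofList kc).filter (fun kv => sel.contains kv)).foldl
        (fun (d : PySem.Dict String String) kv =>
          d.insert kv (PySem.Str.join sep (pvInnerA kc vc kv))) PySem.Dict.empty).items
      = PySem.Dict.empty.items
        ++ ((PySem.Set.ofList kc).filter (fun kv => sel.contains kv)).map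
            (fun kv => (kv, PySem.Str.join sep (pvInnerA kc vc kv))) :=
    PySem.Dict.items_foldl_insert_fresh _ (fun a => a)
      (fun kv => PySem.Str.join sep (pvInnerA kc vc kv)) PySem.Dict.empty
      (by intro a _; exact PySem.Dict.contains_empty a)
      (by simpa using (PySem.Set.nodup_ofList kc).filter (fun k => sel.contains k))
  rw [hI]
  rfl

lemma pvRangeFilter (kv : String) : ∀ (vc kc : List String), vc.length ≤ kc.length →
    ((List.range vc.length).filter (fun i => kc[i]?.getD "" == kv)).map (fun i => vc[i]?.getD "")
    = pvGroup kc vc kv := by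
  intro vc
  induction vc with
  | nil => intro kc _; simp [pvGroup]
  | cons v vt ih =>
    intro kc h
    cases kc with
    | nil => simp at h
    | cons k kt =>
      have h' : vt.length ≤ kt.length := by simpa using h
      simp only [List.length_cons]
      rw [List.range_succ_eq_map, List.filter_cons]
      simp only [List.getElem?_cons_zero, Option.getD_some, List.filter_map]
      have hrec : ((List.range vt.length).filter
            ((fun i => ((k :: kt)[i]?.getD "" == kv)) ∘ Nat.succ)).map
            ((fun i => (v :: vt)[i]?.getD "") ∘ Nat.succ)
          = pvGroup kt vt kv := by
        have e1 : ((fun i => ((k :: kt)[i]?.getD "" == kv)) ∘ Nat.succ)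
            = fun i => (kt[i]?.getD "" == kv) := by funext i; simp
        have e2 : ((fun i => (v :: vt)[i]?.getD "") ∘ Nat.succ)
            = fun i => vt[i]?.getD "" := by funext i; simp
        rw [e1, e2]
        exact ih kt h'
      by_cases hk : (k == kv) = true
      · rw [if_pos (by simpa using hk)]
        simp only [List.map_cons, List.getElem?_cons_zero, Option.getD_some, List.map_map]
        rw [hrec]
        simp [pvGroup, List.filter_cons, hk]
      · rw [if_neg (by simp [hk])]
        rw [List.map_map, hrec]
        simp [pvGroup, List.filter_cons, hk]

lemma pvInnerA_eq (kc vc : List String) (kv : String) (h : vc.length ≤ kc.length) :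
    pvInnerA kc vc kv = pvGroup kc vc kv := by
  unfold pvInnerA
  rw [PySem.List.foldl_append_if, PySem.List.pyRange_zero_natCast, List.filter_map, List.map_map]
  have e1 : ((fun r => ((PySem.List.pyGet? kc r).getD "" == kv)) ∘ (fun k : Nat => (k : Int)))
      = fun i : Nat => (kc[i]?.getD "" == kv) := by
    funext i; simp [PySem.List.pyGet?_natCast]
  have e2 : ((fun r => (PySem.List.pyGet? vc r).getD "") ∘ (fun k : Nat => (k : Int)))
      = fun i : Nat => vc[i]?.getD "" := by
    funext i; simp [PySem.List.pyGet?_natCast]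
  rw [e1, e2]
  simpa using pvRangeFilter kv vc kc h

-- ===== B side =====
lemma pvReg_dict (P : String → Bool) :
    ∀ (rest : List String) (g : PySem.Dict String (List String)) (s : List String),
    g.items = s.map (fun k => (k, ([] : List String))) → s.Nodup →
    (rest.foldl (fun g k => if (P k && !(g.contains k)) then g.insert k [] else g) g).items
    = (rest.foldl (fun s k => if (P k && !(s.contains k)) then s ++ [k] else s) s).map
        (fun k => (k, ([] : List String))) := by
  intro rest
  induction rest with
  | nil =>
    intro g s hg _
    simp only [List.foldl_nil]
    exact hg
  | cons x rest ih =>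
    intro g s hg hs
    have hkeys : g.keys = s := by
      simp only [PySem.Dict.keys, hg, List.map_map]
      exact List.map_id' s
    have hc : g.contains x = s.contains x := by
      rw [PySem.Dict.contains_eq_decide_mem_keys, hkeys]
      simp
    simp only [List.foldl_cons, hc]
    by_cases hcond : (P x && !(s.contains x)) = true
    · rw [if_pos hcond, if_pos hcond]
      have hxs : x ∉ s := by
        have hparts : P x = true ∧ x ∉ s := by simpa using hcond
        exact hparts.2
      refine ih (g.insert x []) (s ++ [x]) ?_ ?_
      · rw [PySem.Dict.items_insert_of_not_contains _ _ (by rw [hc]; simpa using hxs), hg]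
        simp
      · refine List.Nodup.append hs (List.nodup_singleton x) ?_
        intro a ha
        simp only [List.mem_singleton]
        intro hax
        exact hxs (hax ▸ ha)
    · rw [if_neg hcond, if_neg hcond]
      exact ih g s hg hs

lemma pvReg_list (P : String → Bool) : ∀ (kc : List String) (u : List String),
    kc.foldl (fun s k => if (P k && !(s.contains k)) then s ++ [k] else s) (u.filter P)
    = (PySem.Set.update u kc).filter P := by
  intro kc
  induction kc with
  | nil => intro u; rfl
  | cons x kc ih =>
    intro u
    have hstep : (if (P x && !((u.filter P).contains x)) then u.filter P ++ [x] else u.filter P)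
        = (PySem.Set.add u x).filter P := by
      simp only [PySem.Set.add, PySem.Set.contains]
      by_cases hu : x ∈ u <;> by_cases hP : P x = true <;>
        simp [hu, hP, List.filter_append, List.mem_filter]
    simp only [List.foldl_cons]
    rw [hstep]
    have hupd : PySem.Set.update u (x :: kc) = PySem.Set.update (PySem.Set.add u x) kc := rfl
    rw [hupd]
    exact ih (PySem.Set.add u x)

lemma pvGuard : ∀ (l : List (String × String)) (g : PySem.Dict String (List String)),
    l.foldl (fun g p => if g.contains p.1 then g.modify p.1 [] (· ++ [p.2]) else g) g
    = (l.filter (fun p => g.contains p.1)).foldl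
        (fun g p => g.modify p.1 [] (· ++ [p.2])) g := by
  intro l
  induction l with
  | nil => intro g; rfl
  | cons p l ih =>
    intro g
    simp only [List.foldl_cons, List.filter_cons]
    by_cases hc : g.contains p.1 = true
    · simp only [hc, if_pos, List.foldl_cons]
      rw [ih (g.modify p.1 [] (· ++ [p.2]))]
      congr 1
      apply List.filter_congr
      intro q _
      rw [PySem.Dict.contains_modify]
      by_cases hq : (q.1 == p.1) = true
      · simp [hq, hc, (by exact eq_of_beq hq : q.1 = p.1)]
      · simp [hq]
    · simp only [hc]
      rw [if_neg (by simp [hc]), if_neg (by simp [hc])]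
      exact ih g

lemma pvUpdate_self (s : List String) : ∀ (l : List String), (∀ x ∈ l, x ∈ s) →
    PySem.Set.update s l = s := by
  intro l
  induction l with
  | nil => intro _; rfl
  | cons x l ih =>
    intro h
    have hx : PySem.Set.add s x = s := by
      simp [PySem.Set.add, PySem.Set.contains, h x (by simp)]
    have hupd : PySem.Set.update s (x :: l) = PySem.Set.update (PySem.Set.add s x) l := rfl
    rw [hupd, hx]
    exact ih (fun y hy => h y (by simp [hy]))

lemma pvReg_items (kc sel : List String) :
    (pvRegisterB (PySem.Set.ofList sel) kc).items
    = (pvKeysF kc sel).map (fun k => (k, ([] : List String))) := by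
  unfold pvRegisterB
  rw [pvReg_dict (fun k => PySem.Set.contains (PySem.Set.ofList sel) k) kc PySem.Dict.empty [] rfl
      List.nodup_nil]
  have hlist := pvReg_list (fun k => PySem.Set.contains (PySem.Set.ofList sel) k) kc []
  simp only [List.filter_nil] at hlist
  rw [hlist]
  have hupd : PySem.Set.update ([] : PySem.Set String) kc = PySem.Set.ofList kc := by
    rw [PySem.Set.ofList_eq_foldl]; rfl
  rw [hupd]
  congr 1
  apply List.filter_congr
  intro k _
  simp [PySem.Set.contains, PySem.Set.mem_ofList]

lemma pvB_eq (kc vc : List String) (sep : String) (sel : List String) :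
    generate_string_with_concatenated_key_values_alt kc vc sep sel
    = (pvKeysF kc sel).map (fun kv => (kv, PySem.Str.join sep (pvGroup kc vc kv))) := by
  unfold generate_string_with_concatenated_key_values_alt pvFillB
  have hnd : (pvKeysF kc sel).Nodup := (PySem.Set.nodup_ofList kc).filter _
  have h0 := pvReg_items kc sel
  set g0 := pvRegisterB (PySem.Set.ofList sel) kc with hg0
  have hkeys0 : g0.keys = pvKeysF kc sel := by
    simp only [PySem.Dict.keys, h0, List.map_map]
    exact List.map_id' (pvKeysF kc sel)
  rw [pvGuard]
  set pairsF := (kc.zip vc).filter (fun p => g0.contains p.1) with hpairsF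
  set g2 := pairsF.foldl (fun g p => g.modify p.1 [] (· ++ [p.2])) g0 with hg2
  have hkeys2 : g2.keys = pvKeysF kc sel := by
    rw [hg2]
    rw [PySem.Dict.keys_foldl_modify_key pairsF (fun p => p.1) []
        (fun _ p => (· ++ [p.2])) g0]
    rw [hkeys0]
    apply pvUpdate_self
    intro x hx
    rcases List.mem_map.mp hx with ⟨p, hp, hpx⟩
    have hcp : g0.contains p.1 = true := (List.mem_filter.mp hp).2
    rw [← hpx, ← hkeys0]
    exact (PySem.Dict.contains_iff_mem_keys g0 p.1).mp hcp
  have hnd2 : g2.keys.Nodup := by rw [hkeys2]; exact hnd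
  rw [PySem.Dict.items_eq_map_keys g2 hnd2 [], hkeys2, List.map_map]
  apply List.map_congr_left
  intro k hk
  have hkmem : k ∈ g0.keys := by rw [hkeys0]; exact hk
  have hck : g0.contains k = true := (PySem.Dict.contains_iff_mem_keys g0 k).mpr hkmem
  have hgetD0 : g0.getD k [] = [] := by
    refine PySem.Dict.getD_of_mem_items g0 ?_ ?_ []
    · rw [h0]
      exact List.mem_map.mpr ⟨k, hk, rfl⟩
    · rw [hkeys0]; exact hnd
  have hgd : g2.getD k [] = (pairsF.filter (fun p => p.1 == k)).map (fun x => x.2) := by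
    rw [hg2, PySem.Dict.getD_foldl_modify_append pairsF g0 k, hgetD0]
    simp
  have hfilter : pairsF.filter (fun p => p.1 == k) = (kc.zip vc).filter (fun p => p.1 == k) := by
    rw [hpairsF, List.filter_filter]
    apply List.filter_congr
    intro q _
    by_cases hq : (q.1 == k) = true
    · simp [hq, (by exact eq_of_beq hq : q.1 = k), hck]
    · simp [hq]
  show (k, PySem.Str.join sep (g2.getD k [])) = (k, PySem.Str.join sep (pvGroup kc vc k))
  rw [hgd, hfilter]
  rfl

-- ===== assembly =====
lemma pvMain (kc vc : List String) (sep : String) (sel : List String)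
    (hPre : Pre_generate_string_with_concatenated_key_values kc vc sep sel) :
    generate_string_with_concatenated_key_values kc vc sep sel
    = generate_string_with_concatenated_key_values_alt kc vc sep sel := by
  rw [pvA_eq, pvB_eq]
  apply List.map_congr_left
  intro kv hkv
  have hmem : kv ∈ kc ∧ sel.contains kv = true := by
    have hm := List.mem_filter.mp hkv
    exact ⟨(PySem.Set.mem_ofList kc kv).mp hm.1, hm.2⟩
  have hlen : vc.length ≤ kc.length := by
    rcases hPre with h | h
    · exact h
    · exact absurd (by simpa using hmem.2) (h kv hmem.1)
  rw [pvInnerA_eq kc vc kv hlen]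

-- ===== VERDICT (by name: the statement is the Claim_ definition above) =====
theorem generate_string_with_concatenated_key_values_spec : Claim_equal_generate_string_with_concatenated_key_values := by
  intro kc vc sep sel _ hPre
  unfold Spec_generate_string_with_concatenated_key_values
  exact pvMain kc vc sep sel hPre
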